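-- pv_equiv track=rewrite | github.com/pypi-data/pypi-mirror-2 | packages/binstr/binstr-1.3.tar.gz/binstr-1.3/binstr.py | b_bin_to_gray
-- ===== SOURCE A (Python) =====
-- def b_bin_to_gray(A='00000000', endian='big'): # {{{
--     '''
--     Convert from binary coding to Gray coding.
--
--     The returned string will always be the same length as the input string.
--     Both the input and output strings will have the same bit-endianness,
--       which can be specifed with the endian argument.
--
--     E.g. b_bin_to_gray() returns '00000000'
--          b_bin_to_gray('1111') returns '1000'
--          b_bin_to_gray('1101', endian='big') returns '1011'
--          b_bin_to_gray('1101', endian='little') returns '0111'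
--     '''
--     assert b_validate(A) == True, \
--         'Invalid b_string : A : %(actual)s' % {'actual': str(A)}
--
--     assert type(endian) is str, \
--         'Invalid type : endian : Expected %(expect)s : %(actual)s' % {
--                                                                       'expect': str(type(str())),
--                                                                       'actual': str(type(endian)),
--                                                                      }
--
--     assert endian == 'little' or endian == 'big', \
--         'Invalid value: endian : Expected %(expect)s : %(actual)s' % {
--                                                                       'expect': '"little" OR "big"',
--                                                                       'actual': str(endian),
--                                                                      }
--
--     if endian == 'little': A = A[::-1] # Make sure endianness is big before conversion
--
--     g = A[0]
--     for i in range(1, len(A)): g += str( int(A[i-1] != A[i]) )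
--
--     if endian == 'little': g = g[::-1] # Convert back to little endian if necessary
--
--     return g
--
-- def b_validate(A='', fail_empty=True): # {{{
--     '''
--     Validate that a given string contains only 0s and 1s.
--
--     This will return True if the string is valid, otherwise it returns False.
--
--     E.g. b_validate() returns False
--          b_validate('') returns False
--          b_validate('', fail_empty=False) returns True
--          b_validate('01010101') returns True
--          b_validate('010120101') returns False
--          b_validate('0101 0101') returns False
--     '''
--     # Assertions cannot be used in here because when optimisation is turned on they
--     #   will be compiled out.
--     t = True
--
--     if t and not(type(A) is str): t = False
--     if t and fail_empty and not(len(A) > 0): t = False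
--
--     if t:
--         from re import compile as re_compile
--         pattern = re_compile('[^01]')
--         t = not( bool(pattern.search(A)) )
--         del re_compile, pattern
--
--     return t
-- ===== SOURCE B (Python) =====
-- def b_bin_to_gray(A='00000000', endian='big'):
--     assert type(A) is str and A != '' and all(c in '01' for c in A), \
--         'Invalid b_string : A : %s' % str(A)
--     assert type(endian) is str and endian in ('little', 'big'), \
--         'Invalid endian : %s' % str(endian)
--
--     if endian == 'little':
--         A = A[::-1]
--
--     n = 0
--     for c in A:
--         n = n * 2 + (c == '1')
--     g = format(n ^ (n >> 1), '0{}b'.format(len(A)))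
--
--     if endian == 'little':
--         g = g[::-1]
--     return g
-- ===== Notes on version B (the rewrite author's own statement) =====
-- stated objective: alternative
-- what changed: Replaces the adjacent-bit string-comparison loop by the closed-form integer identity gray = n ^ (n >> 1): the bit string is read as an integer, xored with its own right shift, and re-formatted zero-padded to the original length.
import Mathlib
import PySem

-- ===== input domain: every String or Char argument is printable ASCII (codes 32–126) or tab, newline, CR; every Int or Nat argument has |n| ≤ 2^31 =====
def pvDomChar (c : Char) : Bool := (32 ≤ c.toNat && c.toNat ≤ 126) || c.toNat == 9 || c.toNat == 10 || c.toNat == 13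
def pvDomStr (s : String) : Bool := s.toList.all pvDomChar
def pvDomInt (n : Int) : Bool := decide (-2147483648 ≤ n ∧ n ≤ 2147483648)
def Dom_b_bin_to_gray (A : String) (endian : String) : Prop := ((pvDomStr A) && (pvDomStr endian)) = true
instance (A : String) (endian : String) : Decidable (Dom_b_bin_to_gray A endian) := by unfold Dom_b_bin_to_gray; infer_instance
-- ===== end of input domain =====

-- B replaces A's adjacent-bit string-comparison loop by the closed-form integer identity
-- gray = n XOR (n >> 1) on the integer value of the bit string (objective: alternative).


-- ===== PORT A =====
-- A's loop 'g = A[0]; for i in range(1, len(A)): g += str(int(A[i-1] != A[i]))' on the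
-- (already big-endian) character list.  A[0] raises IndexError on the empty string; that
-- input is excluded by Pre_ (the '' returned there is never claimed about).
def pvGrayCoreA (l : List Char) : List Char :=
  match PySem.List.pyGet? l 0 with
  | none => []
  | some c0 =>
    (PySem.List.pyRange 1 (l.length : Int)).foldl
      (fun g i =>
        g ++ [if PySem.List.pyGet? l (i - 1) ≠ PySem.List.pyGet? l i then '1' else '0'])
      [c0]

-- the three asserts of A are Pre_; A[::-1] (slice with step -1) is exactly List.reverse
def b_bin_to_gray (A : String) (endian : String) : String :=
  let l := if endian = "little" then A.toList.reverse else A.toList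
  let g := pvGrayCoreA l
  String.ofList (if endian = "little" then g.reverse else g)

-- ===== PORT B =====
-- B's loop 'n = 0; for c in A: n = n*2 + (c == '1')'
def pvVal (l : List Char) : Nat :=
  l.foldl (fun a c => 2 * a + (if c = '1' then 1 else 0)) 0

-- binary digits of n, most significant first ([] for 0); together with pvFmtBin this is
-- Python's format(n, '0{}b'.format(w)) for n ≥ 0, exact
def pvNatBin : Nat → List Char
  | 0 => []
  | (n + 1) => pvNatBin ((n + 1) / 2) ++ [if (n + 1) % 2 = 1 then '1' else '0']
decreasing_by omega

def pvFmtBin (n w : Nat) : List Char :=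
  let s := if n = 0 then ['0'] else pvNatBin n
  List.replicate (w - s.length) '0' ++ s

def pvGrayCoreB (l : List Char) : List Char :=
  let n := pvVal l
  pvFmtBin (n ^^^ (n >>> 1)) l.length

-- B's asserts are the same Pre_; the endian reversals are identical to A's
def b_bin_to_gray_alt (A : String) (endian : String) : String :=
  let l := if endian = "little" then A.toList.reverse else A.toList
  let g := pvGrayCoreB l
  String.ofList (if endian = "little" then g.reverse else g)

-- ===== PRECONDITION & SPEC =====
-- exactly the inputs passing A's three asserts: a nonempty string of '0'/'1' characters
-- and endian ∈ {"little", "big"}; on all others A raises AssertionError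
def Pre_b_bin_to_gray (A : String) (endian : String) : Prop :=
  A.toList ≠ [] ∧ (A.toList.all (fun c => c == '0' || c == '1')) = true ∧
    (endian = "little" ∨ endian = "big")
instance (A : String) (endian : String) : Decidable (Pre_b_bin_to_gray A endian) := by
  unfold Pre_b_bin_to_gray; infer_instance

def pvWitness_b_bin_to_gray : String × String := ("1101", "big")

def Spec_b_bin_to_gray (A : String) (endian : String) (out : String) : Prop := out = b_bin_to_gray_alt A endian
instance (A : String) (endian : String) (out : String) : Decidable (Spec_b_bin_to_gray A endian out) := by unfold Spec_b_bin_to_gray; infer_instance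

-- ===== CLAIM (what is proved, stated in full; the proofs are below) =====
def Claim_equal_b_bin_to_gray : Prop := ∀ (A : String) (endian : String), Dom_b_bin_to_gray A endian → Pre_b_bin_to_gray A endian → Spec_b_bin_to_gray A endian (b_bin_to_gray A endian)

-- ===== LEMMAS AND PROOFS =====

theorem pvGrayStep (v d : Nat) (hd : d ≤ 1) :
    (2*v+d) ^^^ ((2*v+d) >>> 1) = 2 * (v ^^^ (v >>> 1)) + (d ^^^ v % 2) := by
  have h1 : (2*v+d) >>> 1 = v := by simp [Nat.shiftRight_one]; omega
  rw [h1]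
  apply Nat.eq_of_testBit_eq
  intro i
  cases i with
  | zero =>
    simp [Nat.testBit_zero, Nat.mul_add_mod_self_left]
    omega
  | succ i =>
    have hx : d ^^^ v % 2 ≤ 1 := by
      have : v % 2 ≤ 1 := by omega
      interval_cases d <;> interval_cases h : (v % 2) <;> decide
    have e1 : (2*v+d)/2 = v := by omega
    have e2 : (2 * (v ^^^ v >>> 1) + (d ^^^ v % 2))/2 = v ^^^ v >>> 1 := by omega
    rw [Nat.testBit_xor]
    rw [Nat.testBit_add_one, e1]
    rw [Nat.testBit_add_one]
    conv_rhs => rw [Nat.testBit_add_one]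
    rw [e2, Nat.testBit_xor, Nat.shiftRight_one]

theorem pvVal_append (m : List Char) (c : Char) :
    pvVal (m ++ [c]) = 2 * pvVal m + (if c = '1' then 1 else 0) := by
  simp [pvVal, List.foldl_append]

theorem pvVal_lt (l : List Char) : pvVal l < 2 ^ l.length := by
  induction l using List.reverseRecOn with
  | nil => simp [pvVal]
  | append_singleton m c ih =>
    rw [pvVal_append]
    simp only [List.length_append, List.length_singleton, pow_succ]
    split_ifs <;> omega

theorem pvVal_mod_two (m : List Char) (h : m ≠ []) :
    pvVal m % 2 = (if m.getLast h = '1' then 1 else 0) := by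
  induction m using List.reverseRecOn with
  | nil => exact absurd rfl h
  | append_singleton m c ih =>
    rw [pvVal_append, List.getLast_append_singleton]
    split_ifs <;> omega

theorem pvNatBin_len (w n : Nat) (h : n < 2 ^ w) : (pvNatBin n).length ≤ w := by
  induction w generalizing n with
  | zero => interval_cases n; simp [pvNatBin]
  | succ w ih =>
    match n with
    | 0 => simp [pvNatBin]
    | (n+1) =>
      rw [pvNatBin]
      have := ih ((n+1)/2) (by omega)
      simp only [List.length_append, List.length_singleton]
      omega

theorem pvNatBin_pos (k : Nat) (hk : 0 < k) :
    pvNatBin k = pvNatBin (k / 2) ++ [if k % 2 = 1 then '1' else '0'] := by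
  match k, hk with
  | (n+1), _ => rw [pvNatBin]

theorem pvFmtStep (n w e : Nat) (hw : 1 ≤ w) (hn : n < 2 ^ w) (he : e ≤ 1) :
    pvFmtBin (2*n + e) (w + 1) = pvFmtBin n w ++ [if e = 1 then '1' else '0'] := by
  rcases Nat.eq_zero_or_pos n with h0 | hp
  · subst h0
    interval_cases e <;>
      simp [pvFmtBin, pvNatBin_pos 1 (by norm_num), pvNatBin] <;>
      · try rw [show w = (w - 1) + 1 by omega, List.replicate_succ']
        try simp
  · have hne : 2*n + e ≠ 0 := by omega
    have hlen : (pvNatBin n).length ≤ w := pvNatBin_len w n hn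
    have hdiv : (2*n+e)/2 = n := by omega
    have hmod : (2*n+e) % 2 = e := by omega
    simp only [pvFmtBin, if_neg hne, if_neg (by omega : ¬ n = 0)]
    rw [pvNatBin_pos _ (by omega), hdiv, hmod]
    simp only [List.length_append, List.length_singleton]
    rw [show w + 1 - ((pvNatBin n).length + 1) = w - (pvNatBin n).length by omega]
    simp

-- the adjacent-pair character A's loop body appends at index i
def pvF (l : List Char) (i : Int) : Char :=
  if PySem.List.pyGet? l (i - 1) ≠ PySem.List.pyGet? l i then '1' else '0'

theorem pvGet_zero (c : Char) (r : List Char) : PySem.List.pyGet? (c :: r) 0 = some c := by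
  simp [PySem.List.pyGet?, PySem.List.pyIdx?]

theorem pvCoreA_cons (c : Char) (r : List Char) :
    pvGrayCoreA (c :: r) =
      c :: (PySem.List.pyRange 1 ((c :: r).length : Int)).map (pvF (c :: r)) := by
  unfold pvGrayCoreA
  rw [pvGet_zero]
  show List.foldl (fun g i => g ++ [pvF (c :: r) i]) [c]
        (PySem.List.pyRange 1 ((c :: r).length : Int)) = _
  rw [PySem.List.foldl_append_singleton_eq_map (pvF (c :: r))]
  rfl

theorem pvGet_append_left (m e : List Char) (j : Int) (h0 : 0 ≤ j) (h : j < m.length) :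
    PySem.List.pyGet? (m ++ e) j = PySem.List.pyGet? m j := by
  have : j = ((j.toNat : Nat) : Int) := by omega
  rw [this, PySem.List.pyGet?_natCast, PySem.List.pyGet?_natCast]
  rw [List.getElem?_append_left (by omega)]

theorem pvGet_last (m : List Char) (c : Char) :
    PySem.List.pyGet? (m ++ [c]) (m.length : Int) = some c := by
  rw [PySem.List.pyGet?_natCast]
  simp

theorem pvGet_penult (m : List Char) (c : Char) (h : m ≠ []) :
    PySem.List.pyGet? (m ++ [c]) ((m.length : Int) - 1) = some (m.getLast h) := by
  rw [show (m.length : Int) - 1 = ((m.length - 1 : Nat) : Int) by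
    have := List.length_pos_iff.mpr h; omega]
  rw [PySem.List.pyGet?_natCast]
  have hlt : m.length - 1 < m.length := by have := List.length_pos_iff.mpr h; omega
  rw [List.getElem?_append_left hlt, List.getElem?_eq_getElem hlt]
  simp [List.getLast_eq_getElem]

theorem pvCoreA_append (m : List Char) (c : Char) (h : m ≠ []) :
    pvGrayCoreA (m ++ [c]) = pvGrayCoreA m ++ [if m.getLast h ≠ c then '1' else '0'] := by
  obtain ⟨m0, r, rfl⟩ : ∃ m0 r, m = m0 :: r := by
    cases m with | nil => exact absurd rfl h | cons a b => exact ⟨a, b, rfl⟩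
  rw [show (m0 :: r) ++ [c] = m0 :: (r ++ [c]) from rfl, pvCoreA_cons, pvCoreA_cons]
  have hlen : ((m0 :: (r ++ [c])).length : Int) = ((m0 :: r).length : Int) + 1 := by
    simp only [List.length_cons, List.length_append, List.length_nil]
    omega
  rw [hlen, PySem.List.pyRange_one_succ_right
    (by simp only [List.length_cons]; omega), List.map_append]
  have hmap : ((PySem.List.pyRange 1 ((m0 :: r).length : Int)).map (pvF (m0 :: (r ++ [c])))) =
      ((PySem.List.pyRange 1 ((m0 :: r).length : Int)).map (pvF (m0 :: r))) := by
    apply List.map_congr_left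
    intro i hi
    rw [PySem.List.mem_pyRange_one] at hi
    unfold pvF
    rw [show (m0 :: (r ++ [c])) = (m0 :: r) ++ [c] from rfl,
        pvGet_append_left _ _ _ (by omega) (by exact_mod_cast by omega),
        pvGet_append_left _ _ _ (by omega) (by exact_mod_cast hi.2)]
  rw [hmap]
  have hlast : pvF (m0 :: (r ++ [c])) (((m0 :: r).length : Int)) =
      (if (m0 :: r).getLast h ≠ c then '1' else '0') := by
    unfold pvF
    rw [show (m0 :: (r ++ [c])) = (m0 :: r) ++ [c] from rfl,
        pvGet_penult _ _ h, pvGet_last]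
    simp only [ne_eq, Option.some.injEq]
  rw [List.map_singleton, hlast]
  simp

theorem pvCore_eq (l : List Char) (hne : l ≠ []) (hv : ∀ c ∈ l, c = '0' ∨ c = '1') :
    pvGrayCoreA l = pvGrayCoreB l := by
  induction l using List.reverseRecOn with
  | nil => exact absurd rfl hne
  | append_singleton m c ih =>
    rcases eq_or_ne m [] with rfl | hm
    · have hr : PySem.List.pyRange 1 (([c] : List Char).length : Int) = [] := by
        apply List.eq_nil_iff_forall_not_mem.mpr
        intro x hx
        rw [PySem.List.mem_pyRange_one] at hx
        simp only [List.length_singleton] at hx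
        omega
      simp only [List.nil_append]
      rw [show [c] = c :: ([] : List Char) from rfl, pvCoreA_cons]
      rw [show (c :: ([] : List Char)) = [c] from rfl, hr]
      rcases hv c (by simp) with rfl | rfl <;>
        simp [pvGrayCoreB, pvVal, pvFmtBin, pvNatBin_pos 1 (by norm_num), pvNatBin]
    · have hvm : ∀ x ∈ m, x = '0' ∨ x = '1' := fun x hx => hv x (by simp [hx])
      have hvc : c = '0' ∨ c = '1' := hv c (by simp)
      have hlastv : m.getLast hm = '0' ∨ m.getLast hm = '1' :=
        hvm _ (List.getLast_mem hm)
      have hlen1 : 1 ≤ m.length := by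
        cases m with | nil => exact absurd rfl hm | cons a b => simp
      rw [pvCoreA_append m c hm, ih hm hvm]
      have hb : (if c = '1' then 1 else 0) ≤ 1 := by split_ifs <;> omega
      have hmod := pvVal_mod_two m hm
      have hvlt := pvVal_lt m
      have hglt : (pvVal m ^^^ pvVal m >>> 1) < 2 ^ m.length :=
        Nat.xor_lt_two_pow hvlt (lt_of_le_of_lt (Nat.shiftRight_le _ _) hvlt)
      simp only [pvGrayCoreB, pvVal_append, List.length_append, List.length_singleton]
      rw [pvGrayStep _ _ hb]
      rw [pvFmtStep _ _ _ hlen1 hglt (by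
        rcases hvc with rfl | rfl <;> simp [hmod] <;> split_ifs <;> decide)]
      congr 1
      rcases hvc with rfl | rfl <;> rcases hlastv with hl | hl <;>
        simp [hmod, hl]

-- ===== VERDICT (by name: the statement is the Claim_ definition above) =====
theorem b_bin_to_gray_spec : Claim_equal_b_bin_to_gray := by
  intro A endian _ hpre
  obtain ⟨hne, hall, _⟩ := hpre
  have hv : ∀ c ∈ A.toList, c = '0' ∨ c = '1' := by
    intro c hc
    simpa [Bool.or_eq_true, beq_iff_eq] using List.all_eq_true.mp hall c hc
  unfold Spec_b_bin_to_gray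
  simp only [b_bin_to_gray, b_bin_to_gray_alt]
  split_ifs with h
  · rw [pvCore_eq _ (by simp [hne]) (by intro c hc; exact hv c (List.mem_reverse.mp hc))]
  · rw [pvCore_eq _ hne hv]
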